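-- pv_equiv track=rewrite | github.com/reiss-koh/AdaSTaR | create_finetune_tfrecords.py | arrays_to_sequences
-- ===== SOURCE A (Python) =====
-- def arrays_to_sequences(token_list_iterable, sequence_length=1024):
--     accum = []
--     for l in token_list_iterable:
--         accum.extend(l)
--         while len(accum) >= sequence_length:
--             yield accum[:sequence_length]
--             accum = accum[sequence_length:]
--     if accum:
--         yield accum
-- ===== SOURCE B (Python) =====
-- def arrays_to_sequences(token_list_iterable, sequence_length=1024):
--     buf = []
--     for l in token_list_iterable:
--         buf.extend(l)
--     for i in range(0, len(buf), sequence_length):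
--         yield buf[i:i+sequence_length]
-- ===== Notes on version B (the rewrite author's own statement) =====
-- stated objective: simpler
-- what changed: Replaces A's interleaved accumulate-and-drain loop (extend, then repeatedly slice off and reassign the buffer inside the iteration) with two separate passes: flatten the whole iterable into one buffer, then yield fixed strides buf[i:i+sequence_length] by index; B is no longer lazy on an infinite stream.
-- outside the precondition, e.g. on arrays_to_sequences([], 0): A returns [], B raises ValueError
import Mathlib
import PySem

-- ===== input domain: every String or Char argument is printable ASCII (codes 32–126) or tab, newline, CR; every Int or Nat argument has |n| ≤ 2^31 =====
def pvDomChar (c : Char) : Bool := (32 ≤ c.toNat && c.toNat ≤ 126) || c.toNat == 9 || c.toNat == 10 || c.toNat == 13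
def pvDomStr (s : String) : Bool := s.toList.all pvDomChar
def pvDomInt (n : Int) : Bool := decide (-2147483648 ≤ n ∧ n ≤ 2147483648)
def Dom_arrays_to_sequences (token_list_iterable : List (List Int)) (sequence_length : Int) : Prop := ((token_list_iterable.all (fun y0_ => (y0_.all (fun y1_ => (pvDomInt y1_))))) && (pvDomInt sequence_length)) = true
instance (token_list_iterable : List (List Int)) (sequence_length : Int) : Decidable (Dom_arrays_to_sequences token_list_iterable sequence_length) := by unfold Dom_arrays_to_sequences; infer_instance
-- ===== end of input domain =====

-- B replaces A's interleaved accumulate-and-drain generator loop with two separate passes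
-- (flatten everything into one buffer, then yield fixed strides by index); equivalence is
-- about the sequence of yielded values (both are generators, neither mutates its argument).

-- ===== PORT A =====
-- the inner 'while len(accum) >= sequence_length: yield accum[:sl]; accum = accum[sl:]' loop;
-- the '0 < sl' conjunct is a totality guard only: for sl ≤ 0 the Python while-loop never terminates
-- once entered (such inputs are outside Pre_).
def pvDrainA (sl : Int) (accum : List Int) : List (List Int) × List Int :=
  if h : 0 < sl ∧ sl ≤ (accum.length : Int) then
    let chunk := PySem.List.slice accum none (some sl)
    let rest := PySem.List.slice accum (some sl) none
    let p := pvDrainA sl rest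
    (chunk :: p.1, p.2)
  else ([], accum)
termination_by accum.length
decreasing_by
  have h0 : sl = ((sl.toNat : Nat) : Int) := (Int.toNat_of_nonneg (le_of_lt h.1)).symm
  show (rest).length < accum.length
  rw [show rest = PySem.List.slice accum (some sl) none from rfl, h0,
      PySem.List.slice_from_natCast, List.length_drop]
  omega

def arrays_to_sequences (token_list_iterable : List (List Int)) (sequence_length : Int) : List (List Int) :=
  let st := token_list_iterable.foldl
    (fun (st : List (List Int) × List Int) l =>
      let accum := st.2 ++ l
      let p := pvDrainA sequence_length accum
      (st.1 ++ p.1, p.2))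
    ([], [])
  st.1 ++ (if st.2 = [] then [] else [st.2])

-- ===== PORT B =====
def arrays_to_sequences_alt (token_list_iterable : List (List Int)) (sequence_length : Int) : List (List Int) :=
  let buf := token_list_iterable.foldl (fun buf l => buf ++ l) []
  (PySem.List.pyRange 0 (buf.length : Int) sequence_length).map
    (fun i => PySem.List.slice buf (some i) (some (i + sequence_length)))

-- ===== PRECONDITION & SPEC =====
-- Pre_ excludes sequence_length < 1 except for the empty iterable with negative length:
-- for sequence_length ≤ 0, A loops forever on any nonempty iterable (it returns only when the
-- iterable itself is empty), and at sequence_length = 0 with the empty iterable A returns the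
-- empty result while B raises ValueError from range(0, 0, 0).
def Pre_arrays_to_sequences (token_list_iterable : List (List Int)) (sequence_length : Int) : Prop :=
  1 ≤ sequence_length ∨ (token_list_iterable = [] ∧ sequence_length < 0)
instance (token_list_iterable : List (List Int)) (sequence_length : Int) : Decidable (Pre_arrays_to_sequences token_list_iterable sequence_length) := by unfold Pre_arrays_to_sequences; infer_instance

def pvWitness_arrays_to_sequences : List (List Int) × Int := ([[1, 2], [3, 4, 5]], 2)

def Spec_arrays_to_sequences (token_list_iterable : List (List Int)) (sequence_length : Int) (out : List (List Int)) : Prop := out = arrays_to_sequences_alt token_list_iterable sequence_length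
instance (token_list_iterable : List (List Int)) (sequence_length : Int) (out : List (List Int)) : Decidable (Spec_arrays_to_sequences token_list_iterable sequence_length out) := by unfold Spec_arrays_to_sequences; infer_instance

-- ===== CLAIM (what is proved, stated in full; the proofs are below) =====
def Claim_equal_arrays_to_sequences : Prop := ∀ (token_list_iterable : List (List Int)) (sequence_length : Int), Dom_arrays_to_sequences token_list_iterable sequence_length → Pre_arrays_to_sequences token_list_iterable sequence_length → Spec_arrays_to_sequences token_list_iterable sequence_length (arrays_to_sequences token_list_iterable sequence_length)

-- ===== LEMMAS AND PROOFS =====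

-- reference chunking of a flat list into blocks of s (last block may be short)
def pvChunks (s : Nat) (xs : List Int) : List (List Int) :=
  if h : 0 < s ∧ xs ≠ [] then xs.take s :: pvChunks s (xs.drop s) else []
termination_by xs.length
decreasing_by
  have : xs.length ≠ 0 := by simpa [List.length_eq_zero_iff] using h.2
  simp only [List.length_drop]; omega

lemma pvChunks_nil (s : Nat) : pvChunks s [] = [] := by
  rw [pvChunks]; simp

lemma pvChunks_short {s : Nat} {xs : List Int} (h : xs.length < s) :
    pvChunks s xs = if xs = [] then [] else [xs] := by
  rw [pvChunks]
  by_cases hx : xs = []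
  · simp [hx]
  · have hs : 0 < s := by
      have : xs.length ≠ 0 := by simpa [List.length_eq_zero_iff] using hx
      omega
    rw [dif_pos ⟨hs, hx⟩]
    have h1 : xs.take s = xs := List.take_of_length_le (le_of_lt h)
    have h2 : xs.drop s = [] := List.drop_eq_nil_of_le (le_of_lt h)
    simp [h1, h2, pvChunks_nil, hx]

lemma pvDrainA_len {sl : Int} (hsl : 1 ≤ sl) (acc : List Int) :
    ((pvDrainA sl acc).2).length < sl.toNat := by
  induction acc using pvDrainA.induct sl with
  | case1 acc h rest ih =>
      rw [pvDrainA, dif_pos h]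
      exact ih
  | case2 acc h =>
      rw [pvDrainA, dif_neg h]
      simp only []
      have : ¬ (1:Int) ≤ sl ∨ ¬ sl ≤ (acc.length : Int) := by
        rcases not_and_or.mp h with h1 | h2
        · left; omega
        · right; exact h2
      omega

lemma pvDrainA_chunks {sl : Int} (hsl : 1 ≤ sl) (acc : List Int) :
    ∀ t : List Int,
      pvChunks sl.toNat (acc ++ t)
        = (pvDrainA sl acc).1 ++ pvChunks sl.toNat ((pvDrainA sl acc).2 ++ t) := by
  induction acc using pvDrainA.induct sl with
  | case1 acc h rest ih =>
      intro t
      have hcast : sl = ((sl.toNat : Nat) : Int) := (Int.toNat_of_nonneg (by omega)).symm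
      have hlen : sl.toNat ≤ acc.length := by omega
      have hs : 0 < sl.toNat := by omega
      have hne : acc ++ t ≠ [] := by
        intro hc
        have hacc : acc = [] := by
          cases acc with | nil => rfl | cons a as => simp at hc
        rw [hacc] at hlen; simp at hlen; omega
      have hchunk : PySem.List.slice acc none (some sl) = acc.take sl.toNat := by
        rw [hcast, PySem.List.slice_to_natCast]
        simp only [Int.toNat_natCast]
      have hrest : rest = acc.drop sl.toNat := by
        show PySem.List.slice acc (some sl) none = _
        rw [hcast, PySem.List.slice_from_natCast]
        simp only [Int.toNat_natCast]
      rw [pvDrainA, dif_pos h]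
      simp only []
      rw [pvChunks, dif_pos ⟨hs, hne⟩]
      rw [List.take_append_of_le_length hlen, List.drop_append_of_le_length hlen]
      rw [hchunk, ← hrest, List.cons_append]
      exact congrArg _ (ih t)
  | case2 acc h =>
      intro t
      rw [pvDrainA, dif_neg h]
      simp

-- A's fold invariant: finishing the fold from (out, acc) yields out ++ chunks of (acc ++ rest)
lemma foldA_invariant {sl : Int} (hsl : 1 ≤ sl) (tli : List (List Int)) :
    ∀ (out : List (List Int)) (acc : List Int), acc.length < sl.toNat →
      (let st := tli.foldl
          (fun (st : List (List Int) × List Int) l =>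
            let accum := st.2 ++ l
            let p := pvDrainA sl accum
            (st.1 ++ p.1, p.2)) (out, acc)
       st.1 ++ (if st.2 = [] then [] else [st.2]))
      = out ++ pvChunks sl.toNat (acc ++ tli.flatten) := by
  induction tli with
  | nil =>
      intro out acc hlen
      simp only [List.foldl_nil, List.flatten_nil, List.append_nil]
      rw [pvChunks_short hlen]
  | cons l t ih =>
      intro out acc hlen
      simp only [List.foldl_cons, List.flatten_cons]
      have hplen := pvDrainA_len hsl (acc ++ l)
      have := ih (out ++ (pvDrainA sl (acc ++ l)).1) (pvDrainA sl (acc ++ l)).2 hplen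
      simp only [] at this ⊢
      rw [this, ← List.append_assoc acc l t.flatten,
          pvDrainA_chunks hsl (acc ++ l) t.flatten]
      simp [List.append_assoc]

-- range with positive step: shifting both endpoints
lemma pyRange_pos_nil {x s : Int} (hx : x ≤ 0) (hs : 0 < s) :
    PySem.List.pyRange 0 x s = [] := by
  rw [PySem.List.pyRange_of_pos _ _ hs]
  simp only [if_neg (by omega : ¬ (0:Int) < x)]
  simp

lemma pyRange_pos_cons {L s : Int} (hL : 0 < L) (hs : 0 < s) :
    PySem.List.pyRange 0 L s = 0 :: (PySem.List.pyRange 0 (L - s) s).map (· + s) := by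
  rw [PySem.List.pyRange_of_pos _ _ hs, if_pos hL]
  have hq : 1 ≤ (L - 0 + s - 1) / s := by
    rw [Int.le_ediv_iff_mul_le hs]; omega
  obtain ⟨m, hm⟩ : ∃ m : Nat, (L - 0 + s - 1) / s = (m : Int) + 1 := by
    refine ⟨((L - 0 + s - 1) / s - 1).toNat, ?_⟩
    omega
  have hcnt : ((L - 0 + s - 1) / s).toNat = m + 1 := by omega
  rw [hcnt, List.range_succ_eq_map, List.map_cons, List.map_map]
  congr 1
  · simp
  by_cases hLs : 0 < L - s
  · rw [PySem.List.pyRange_of_pos _ _ hs, if_pos hLs, List.map_map]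
    have : (L - s - 0 + s - 1) / s = (m : Int) := by
      have heq : L - s - 0 + s - 1 = (L - 0 + s - 1) + (-1) * s := by ring
      rw [heq, Int.add_mul_ediv_right _ _ (by omega : s ≠ 0)]
      omega
    rw [this]
    simp only [Int.toNat_natCast]
    apply List.map_congr_left
    intro k _
    simp; ring
  · -- L ≤ s : the tail range is empty and m = 0
    rw [pyRange_pos_nil (by omega) hs]
    have hm0 : m = 0 := by
      have : (L - 0 + s - 1) / s = 1 := by
        have h1 : L - 0 + s - 1 = (L - 1) + s * 1 := by ring
        rw [h1, Int.add_mul_ediv_left _ _ (by omega : s ≠ 0),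
            Int.ediv_eq_zero_of_lt (by omega) (by omega)]
        norm_num
      omega
    simp [hm0]

lemma strideB {sl : Int} (hsl : 1 ≤ sl) (buf : List Int) :
    (PySem.List.pyRange 0 (buf.length : Int) sl).map
        (fun i => PySem.List.slice buf (some i) (some (i + sl)))
      = pvChunks sl.toNat buf := by
  obtain ⟨n, rfl⟩ : ∃ n : Nat, sl = (n : Int) :=
    ⟨sl.toNat, (Int.toNat_of_nonneg (by omega)).symm⟩
  have hn : 0 < n := by exact_mod_cast hsl
  have hs : (0 : Int) < (n : Int) := by exact_mod_cast hn
  simp only [Int.toNat_natCast]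
  induction hlen : buf.length using Nat.strong_induction_on generalizing buf with
  | _ L ih =>
  subst hlen
  cases hbuf : buf with
  | nil =>
      subst hbuf
      rw [pyRange_pos_nil (by simp) hs, pvChunks_nil]
      simp
  | cons x xs =>
      rw [← hbuf]
      have hbne : buf ≠ [] := by subst hbuf; simp
      have hL : 0 < (buf.length : Int) := by subst hbuf; simp
      rw [pyRange_pos_cons hL hs, List.map_cons, List.map_map]
      rw [pvChunks, dif_pos ⟨hn, hbne⟩]
      congr 1
      · -- head chunk: buf[0 : n] = take n buf
        simp only [zero_add, PySem.List.slice_zero_start]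
        rw [PySem.List.slice_to_natCast]
      · -- tail: shift every index by n and drop n elements
        by_cases hle : n ≤ buf.length
        · have hdlen : ((buf.drop n).length : Int) = (buf.length : Int) - (n : Int) := by
            simp only [List.length_drop]; omega
          have hrec := ih (buf.drop n).length (by
              have : buf.length ≠ 0 := by subst hbuf; simp
              simp only [List.length_drop]; omega) (buf.drop n) rfl
          rw [← hdlen, ← hrec]
          apply List.map_congr_left
          intro i hi
          have hi0 : 0 ≤ i := ((PySem.List.mem_pyRange_iff_of_pos hs i).mp hi).1
          obtain ⟨a, rfl⟩ : ∃ a : Nat, i = (a : Int) :=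
            ⟨i.toNat, (Int.toNat_of_nonneg hi0).symm⟩
          simp only [Function.comp_apply]
          rw [show (a : Int) + (n : Int) = ((a + n : Nat) : Int) by push_cast; ring]
          rw [show ((a + n : Nat) : Int) + (n : Int) = ((a + n + n : Nat) : Int) by push_cast; ring]
          rw [PySem.List.slice_natCast, PySem.List.slice_natCast, List.drop_drop]
          congr 1
          · omega
          · rw [Nat.add_comm]
        · -- buffer shorter than the stride: both sides are empty
          have hdrop : buf.drop n = [] := List.drop_eq_nil_of_le (by omega)
          rw [pyRange_pos_nil (show (buf.length : Int) - (n : Int) ≤ 0 by omega) hs]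
          rw [hdrop, pvChunks_nil]
          simp

lemma foldl_append_flatten (tli : List (List Int)) :
    ∀ init : List Int, tli.foldl (fun buf l => buf ++ l) init = init ++ tli.flatten := by
  induction tli with
  | nil => intro init; simp
  | cons l t ih => intro init; simp [ih, List.append_assoc]

-- ===== VERDICT (by name: the statement is the Claim_ definition above) =====
theorem arrays_to_sequences_spec : Claim_equal_arrays_to_sequences := by
  intro tli sl _ hpre
  unfold Spec_arrays_to_sequences arrays_to_sequences arrays_to_sequences_alt
  rcases hpre with hsl | ⟨hnil, hneg⟩
  · rw [foldl_append_flatten tli []]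
    simp only [List.nil_append]
    rw [strideB hsl tli.flatten]
    have := foldA_invariant hsl tli [] [] (by
      have : (0:Int) < sl := by omega
      simp; omega)
    simp only [List.nil_append] at this
    exact this
  · subst hnil
    simp only [List.foldl_nil, List.length_nil, Int.natCast_zero]
    rw [show PySem.List.pyRange 0 0 sl = [] by simp [PySem.List.pyRange]]
    simp only [List.map_nil]
    rfl
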